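-- pv_equiv track=rewrite | github.com/JoeKoss/Connect4 | connect4.py | checkForDownVertical
-- ===== SOURCE A (Python) =====
-- def checkForDownVertical(row, col, n, symbol, tBoard):
-- 	if row + 1 <= 5:
-- 		if tBoard[row+1][col] != symbol:
-- 			return n
-- 		else:
-- 			return 5 + checkForDownVertical(row + 1, col, n, symbol, tBoard)
-- 	else:
-- 		return n
-- ===== SOURCE B (Python) =====
-- def checkForDownVertical(row, col, n, symbol, tBoard):
-- 	k = 0
-- 	r = row + 1
-- 	while r <= 5 and tBoard[r][col] == symbol:
-- 		k += 1
-- 		r += 1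
-- 	return n + 5 * k
-- ===== Notes on version B (the rewrite author's own statement) =====
-- stated objective: simpler
-- what changed: Replaces the tail recursion that threads n through every call with an iterative loop that counts the run length k of matching cells below row and returns n + 5*k in one closed step.
import Mathlib
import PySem

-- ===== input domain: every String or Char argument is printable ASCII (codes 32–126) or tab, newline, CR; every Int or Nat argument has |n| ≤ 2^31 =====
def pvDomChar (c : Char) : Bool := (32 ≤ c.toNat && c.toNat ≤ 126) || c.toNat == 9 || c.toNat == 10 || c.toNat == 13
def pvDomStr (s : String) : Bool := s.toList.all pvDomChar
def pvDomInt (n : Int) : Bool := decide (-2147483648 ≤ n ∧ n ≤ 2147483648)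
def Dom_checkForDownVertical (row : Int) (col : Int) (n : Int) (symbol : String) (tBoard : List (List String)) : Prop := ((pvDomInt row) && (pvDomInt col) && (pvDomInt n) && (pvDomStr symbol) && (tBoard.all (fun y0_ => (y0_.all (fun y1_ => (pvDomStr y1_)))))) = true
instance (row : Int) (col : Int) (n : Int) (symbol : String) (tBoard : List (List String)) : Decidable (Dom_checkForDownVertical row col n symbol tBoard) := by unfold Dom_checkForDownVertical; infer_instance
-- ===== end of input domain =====

-- B replaces A's tail recursion threading n with a loop that counts the run length k
-- of matching cells below row and returns n + 5*k (simpler decomposition, same cost).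


-- shared cell accessor: tBoard[r][col] with Python indexing; the "" / [] defaults are only
-- reached where Python raises IndexError, which Pre_ excludes
def pvCell (tBoard : List (List String)) (r : Int) (col : Int) : String :=
  (PySem.List.pyGet? ((PySem.List.pyGet? tBoard r).getD []) col).getD ""

-- tBoard[r][col] exists (neither index raises)
def pvCellOk (tBoard : List (List String)) (col : Int) (r : Int) : Bool :=
  ((PySem.List.pyGet? tBoard r).bind (fun rowL => PySem.List.pyGet? rowL col)).isSome

-- ===== PORT A =====
def checkForDownVertical (row : Int) (col : Int) (n : Int) (symbol : String) (tBoard : List (List String)) : Int :=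
  if h : row + 1 ≤ 5 then
    if pvCell tBoard (row + 1) col ≠ symbol then n
    else 5 + checkForDownVertical (row + 1) col n symbol tBoard
  else n
termination_by (5 - row).toNat
decreasing_by omega

-- ===== PORT B =====
-- the while loop of Source B: r runs from row+1, k counts consecutive matches
def pvRunLen (col : Int) (symbol : String) (tBoard : List (List String)) (r : Int) (k : Int) : Int :=
  if h : r ≤ 5 then
    if pvCell tBoard r col = symbol then pvRunLen col symbol tBoard (r + 1) (k + 1) else k
  else k
termination_by (6 - r).toNat
decreasing_by omega

def checkForDownVertical_alt (row : Int) (col : Int) (n : Int) (symbol : String) (tBoard : List (List String)) : Int :=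
  n + 5 * pvRunLen col symbol tBoard (row + 1) 0

-- ===== PRECONDITION & SPEC =====
-- Pre_ holds exactly where Python's A returns: either no cell is ever read (row+1 > 5), or the
-- downward scan from row+1 stops — at the first index above 5 or at the first mismatching cell —
-- with every cell it reads in range; it excludes only the inputs where A raises IndexError on an
-- out-of-range cell.  (The scan from row+1 reads at most tBoard.length + 6 cells, since its first
-- read already raises when row+1 < -tBoard.length; hence the bound on j.)
def Pre_checkForDownVertical (row : Int) (col : Int) (n : Int) (symbol : String) (tBoard : List (List String)) : Prop :=
  5 < row + 1 ∨
  ∃ j ∈ List.range (tBoard.length + 7),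
    (∀ i ∈ List.range j,
        pvCellOk tBoard col (row + 1 + (i : Int)) = true ∧
        pvCell tBoard (row + 1 + (i : Int)) col = symbol ∧
        row + 1 + (i : Int) ≤ 5) ∧
    (5 < row + 1 + (j : Int) ∨
     (pvCellOk tBoard col (row + 1 + (j : Int)) = true ∧
      pvCell tBoard (row + 1 + (j : Int)) col ≠ symbol))
instance (row : Int) (col : Int) (n : Int) (symbol : String) (tBoard : List (List String)) : Decidable (Pre_checkForDownVertical row col n symbol tBoard) := by unfold Pre_checkForDownVertical; infer_instance

def pvWitness_checkForDownVertical : Int × Int × Int × String × List (List String) :=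
  (0, 0, 7, "x", [["x"], ["o"]])

def Spec_checkForDownVertical (row : Int) (col : Int) (n : Int) (symbol : String) (tBoard : List (List String)) (out : Int) : Prop := out = checkForDownVertical_alt row col n symbol tBoard
instance (row : Int) (col : Int) (n : Int) (symbol : String) (tBoard : List (List String)) (out : Int) : Decidable (Spec_checkForDownVertical row col n symbol tBoard out) := by unfold Spec_checkForDownVertical; infer_instance

-- ===== CLAIM (what is proved, stated in full; the proofs are below) =====
def Claim_equal_checkForDownVertical : Prop := ∀ (row : Int) (col : Int) (n : Int) (symbol : String) (tBoard : List (List String)), Dom_checkForDownVertical row col n symbol tBoard → Pre_checkForDownVertical row col n symbol tBoard → Spec_checkForDownVertical row col n symbol tBoard (checkForDownVertical row col n symbol tBoard)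

-- ===== LEMMAS AND PROOFS =====

-- the accumulator of B's loop factors out
lemma pvRunLen_acc (col : Int) (symbol : String) (tBoard : List (List String)) (r k : Int) :
    pvRunLen col symbol tBoard r k = k + pvRunLen col symbol tBoard r 0 := by
  suffices H : ∀ m : Nat, ∀ r k : Int, (6 - r).toNat ≤ m →
      pvRunLen col symbol tBoard r k = k + pvRunLen col symbol tBoard r 0 from
    H _ r k le_rfl
  intro m
  induction m with
  | zero =>
    intro r k h
    have h1 : ¬ r ≤ 5 := by omega
    rw [pvRunLen, dif_neg h1]
    conv_rhs => rw [pvRunLen, dif_neg h1]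
    ring
  | succ m ih =>
    intro r k h
    by_cases h1 : r ≤ 5
    · by_cases h2 : pvCell tBoard r col = symbol
      · have hm : (6 - (r + 1)).toNat ≤ m := by omega
        rw [pvRunLen, dif_pos h1, if_pos h2]
        conv_rhs => rw [pvRunLen, dif_pos h1, if_pos h2]
        rw [ih (r + 1) (k + 1) hm, ih (r + 1) (0 + 1) hm]
        ring
      · rw [pvRunLen, dif_pos h1, if_neg h2]
        conv_rhs => rw [pvRunLen, dif_pos h1, if_neg h2]
        ring
    · rw [pvRunLen, dif_neg h1]
      conv_rhs => rw [pvRunLen, dif_neg h1]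
      ring

-- A's recursion returns n plus 5 for every cell of the downward run: B's closed step
lemma checkForDownVertical_eq (row col n : Int) (symbol : String) (tBoard : List (List String)) :
    checkForDownVertical row col n symbol tBoard
      = n + 5 * pvRunLen col symbol tBoard (row + 1) 0 := by
  suffices H : ∀ m : Nat, ∀ row : Int, (5 - row).toNat ≤ m →
      checkForDownVertical row col n symbol tBoard
        = n + 5 * pvRunLen col symbol tBoard (row + 1) 0 from
    H _ row le_rfl
  intro m
  induction m with
  | zero =>
    intro row h
    have h1 : ¬ row + 1 ≤ 5 := by omega
    rw [checkForDownVertical, dif_neg h1, pvRunLen, dif_neg h1]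
    ring
  | succ m ih =>
    intro row h
    by_cases h1 : row + 1 ≤ 5
    · by_cases h2 : pvCell tBoard (row + 1) col = symbol
      · have hm : (5 - (row + 1)).toNat ≤ m := by omega
        rw [checkForDownVertical, dif_pos h1, if_neg (by simp [h2])]
        conv_rhs => rw [pvRunLen, dif_pos h1, if_pos h2]
        rw [ih (row + 1) hm, pvRunLen_acc col symbol tBoard (row + 1 + 1) (0 + 1)]
        ring
      · rw [checkForDownVertical, dif_pos h1, if_pos h2, pvRunLen, dif_pos h1, if_neg h2]
        ring
    · rw [checkForDownVertical, dif_neg h1, pvRunLen, dif_neg h1]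
      ring

-- ===== VERDICT (by name: the statement is the Claim_ definition above) =====
theorem checkForDownVertical_spec : Claim_equal_checkForDownVertical := by
  intro row col n symbol tBoard _ _
  unfold Spec_checkForDownVertical checkForDownVertical_alt
  exact checkForDownVertical_eq row col n symbol tBoard
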